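-- pv_equiv track=rewrite | github.com/pritesh-2711/python-performance-playbook | labs/multiprocessing/02_pickle_ipc_tax_paths_vs_payloads.py | _force_big_text
-- ===== SOURCE A (Python) =====
-- def _force_big_text(text: str, target_bytes: int) -> str:
--     """
--     Create a BIG string payload by repeating the same real text.
--     This is not synthetic text; it's the same real doc repeated to hit size.
--     """
--     if target_bytes <= 0:
--         return text
--     # fast-ish growth
--     chunk = text if text else "x"
--     out = text
--     while len(out.encode("utf-8", errors="ignore")) < target_bytes:
--         out += "\n" + chunk
--         # exponential-ish growth
--         chunk = out
--         if len(out) > 50_000_000:  # safety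
--             break
--     return out
-- ===== SOURCE B (Python) =====
-- def _force_big_text(text: str, target_bytes: int) -> str:
--     """Closed-form: compute the number of doublings arithmetically, build once with join."""
--     if target_bytes <= 0:
--         return text
--     nb = len(text.encode("utf-8", errors="ignore"))
--     if nb >= target_bytes:
--         return text
--     if text:
--         unit, ub, uc, m = text, nb, len(text), 1
--     else:
--         unit, ub, uc, m = "\nx", 2, 2, 0
--     while 2 ** m * (ub + 1) - 1 < target_bytes and 2 ** m * (uc + 1) - 1 <= 50_000_000:
--         m += 1
--     return "\n".join([unit] * 2 ** m)
-- ===== Notes on version B (the rewrite author's own statement) =====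
-- stated objective: alternative
-- what changed: A grows the payload by repeated in-place string doubling inside a while loop; B computes the required number of doublings arithmetically from the byte/char length formulas (2^m*(len+1)-1) and builds the result once with a single "\n".join of 2^m copies.
import Mathlib
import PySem

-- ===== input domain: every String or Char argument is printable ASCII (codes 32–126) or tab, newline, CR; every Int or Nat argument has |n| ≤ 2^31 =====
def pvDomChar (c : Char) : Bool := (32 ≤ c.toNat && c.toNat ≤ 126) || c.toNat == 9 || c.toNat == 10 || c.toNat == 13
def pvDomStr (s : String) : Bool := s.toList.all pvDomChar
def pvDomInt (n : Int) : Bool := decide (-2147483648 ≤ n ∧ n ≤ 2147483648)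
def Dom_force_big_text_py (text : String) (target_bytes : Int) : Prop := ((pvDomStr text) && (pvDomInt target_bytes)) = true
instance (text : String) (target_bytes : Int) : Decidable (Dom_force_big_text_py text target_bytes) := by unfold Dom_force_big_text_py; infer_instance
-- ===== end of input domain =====

-- B replaces A's repeated string-doubling loop by an arithmetic search for the number of
-- doublings followed by a single "\n".join (objective: alternative decomposition, same result).


-- ===== PORT A =====
-- UTF-8 byte length of one code point (exact for every Char; `errors="ignore"` only drops
-- surrogates, which Char cannot hold) — ports len(s.encode("utf-8", errors="ignore")).
def pvUtf8Len (c : Char) : Nat :=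
  if c.toNat < 128 then 1 else if c.toNat < 2048 then 2 else if c.toNat < 65536 then 3 else 4

def pvBytes (l : List Char) : Nat := (l.map pvUtf8Len).sum

theorem pvBytes_append (a b : List Char) : pvBytes (a ++ b) = pvBytes a + pvBytes b := by
  simp [pvBytes]

-- the while-loop of A: out += "\n" + chunk; chunk = out; break if len(out) > 50_000_000
theorem pvLoopA_dec (target : Int) (out chunk : List Char)
    (h : (pvBytes out : Int) < target) :
    (target - (pvBytes (out ++ '\n' :: chunk) : Int)).toNat
      < (target - (pvBytes out : Int)).toNat := by
  have h1 := pvBytes_append out ('\n' :: chunk)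
  have h2 : pvBytes ('\n' :: chunk) = 1 + pvBytes chunk := by simp [pvBytes, pvUtf8Len]
  omega

def pvLoopA (target : Int) (out chunk : List Char) : List Char :=
  if (pvBytes out : Int) < target then
    let out' := out ++ '\n' :: chunk
    if out'.length > 50000000 then out' else pvLoopA target out' out'
  else out
termination_by (target - pvBytes out).toNat
decreasing_by
  rename_i h _
  exact pvLoopA_dec target out chunk h

def force_big_text_py (text : String) (target_bytes : Int) : String :=
  if target_bytes ≤ 0 then text
  else
    let chunk := if text.toList ≠ [] then text.toList else ['x']
    String.ofList (pvLoopA target_bytes text.toList chunk)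

-- ===== PORT B =====
-- the counting loop of Source B: smallest m (from m0) whose byte-length formula reaches the
-- target or whose char-length formula leaves the 50_000_000 safety bound
theorem pvFindM_dec (target : Int) (ub uc m : Nat)
    (h : (2 ^ m * (ub + 1) : Int) - 1 < target ∧ (2 ^ m * (uc + 1) : Int) - 1 ≤ 50000000) :
    50000002 - 2 ^ (m + 1) * (uc + 1) < 50000002 - 2 ^ m * (uc + 1) := by
  have h2 : (2 ^ m * (uc + 1) : Int) ≤ 50000001 := by omega
  have h2' : 2 ^ m * (uc + 1) ≤ 50000001 := by exact_mod_cast h2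
  have h3 : 2 ^ (m + 1) * (uc + 1) = 2 * (2 ^ m * (uc + 1)) := by ring
  have h4 : 0 < 2 ^ m * (uc + 1) := by positivity
  omega

def pvFindM (target : Int) (ub uc : Nat) (m : Nat) : Nat :=
  if (2 ^ m * (ub + 1) : Int) - 1 < target ∧ (2 ^ m * (uc + 1) : Int) - 1 ≤ 50000000 then
    pvFindM target ub uc (m + 1)
  else m
termination_by 50000002 - 2 ^ m * (uc + 1)
decreasing_by
  rename_i h
  exact pvFindM_dec target ub uc m h

def force_big_text_py_alt (text : String) (target_bytes : Int) : String :=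
  if target_bytes ≤ 0 then text
  else
    let tl := text.toList
    let nb := pvBytes tl
    if (nb : Int) ≥ target_bytes then text
    else
      let p : List Char × Nat × Nat × Nat :=
        if tl ≠ [] then (tl, nb, tl.length, 1) else (['\n', 'x'], 2, 2, 0)
      let m := pvFindM target_bytes p.2.1 p.2.2.1 p.2.2.2
      String.ofList (PySem.Chars.join ['\n'] (List.replicate (2 ^ m) p.1))

-- ===== PRECONDITION & SPEC =====
def Spec_force_big_text_py (text : String) (target_bytes : Int) (out : String) : Prop := out = force_big_text_py_alt text target_bytes
instance (text : String) (target_bytes : Int) (out : String) : Decidable (Spec_force_big_text_py text target_bytes out) := by unfold Spec_force_big_text_py; infer_instance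

-- ===== CLAIM (what is proved, stated in full; the proofs are below) =====
def Claim_equal_force_big_text_py : Prop := ∀ (text : String) (target_bytes : Int), Dom_force_big_text_py text target_bytes → Spec_force_big_text_py text target_bytes (force_big_text_py text target_bytes)

-- ===== LEMMAS AND PROOFS =====

-- out after k self-doubling steps
def pvRep (v : List Char) : Nat → List Char
  | 0 => v
  | m + 1 => pvRep v m ++ '\n' :: pvRep v m

theorem pvRep_length (v : List Char) (m : Nat) :
    (pvRep v m).length + 1 = 2 ^ m * (v.length + 1) := by
  induction m with
  | zero => simp [pvRep]
  | succ m ih =>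
      have : 2 ^ (m + 1) * (v.length + 1) = 2 * (2 ^ m * (v.length + 1)) := by ring
      simp only [pvRep, List.length_append, List.length_cons]
      omega

theorem pvRep_bytes (v : List Char) (m : Nat) :
    pvBytes (pvRep v m) + 1 = 2 ^ m * (pvBytes v + 1) := by
  induction m with
  | zero => simp [pvRep]
  | succ m ih =>
      have : 2 ^ (m + 1) * (pvBytes v + 1) = 2 * (2 ^ m * (pvBytes v + 1)) := by ring
      have hb1 := pvBytes_append (pvRep v m) ('\n' :: pvRep v m)
      have hb2 : pvBytes ('\n' :: pvRep v m) = 1 + pvBytes (pvRep v m) := by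
        simp [pvBytes, pvUtf8Len]
      have hb : pvBytes (pvRep v (m + 1)) = pvBytes (pvRep v m) + 1 + pvBytes (pvRep v m) := by
        rw [show pvRep v (m + 1) = pvRep v m ++ '\n' :: pvRep v m from rfl]
        omega
      omega

theorem pvJoin_append (s : List Char) :
    ∀ l1 l2 : List (List Char), l1 ≠ [] → l2 ≠ [] →
    PySem.Chars.join s (l1 ++ l2) = PySem.Chars.join s l1 ++ s ++ PySem.Chars.join s l2 := by
  intro l1
  induction l1 with
  | nil => intro l2 h1 _; exact absurd rfl h1
  | cons p rest ih =>
      intro l2 h1 h2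
      cases rest with
      | nil =>
          cases l2 with
          | nil => exact absurd rfl h2
          | cons q r =>
              simp [PySem.Chars.join_cons_cons, PySem.Chars.join_singleton]
      | cons p2 r2 =>
          have hne : p2 :: r2 ++ l2 ≠ [] := by simp
          have := ih l2 (by simp) h2
          simp only [List.cons_append]
          rw [PySem.Chars.join_cons_cons, PySem.Chars.join_cons_cons]
          rw [show (p2 :: r2) ++ l2 = p2 :: (r2 ++ l2) from rfl] at this
          rw [this]
          simp [List.append_assoc]

theorem pvJoin_replicate_pow (v : List Char) (m : Nat) :
    PySem.Chars.join ['\n'] (List.replicate (2 ^ m) v) = pvRep v m := by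
  induction m with
  | zero => simp [pvRep, PySem.Chars.join_singleton]
  | succ m ih =>
      have hsplit : List.replicate (2 ^ (m + 1)) v
          = List.replicate (2 ^ m) v ++ List.replicate (2 ^ m) v := by
        rw [← List.replicate_add]; congr 1; ring
      have hne : List.replicate (2 ^ m) v ≠ [] := by
        simp only [ne_eq, List.replicate_eq_nil_iff]
        exact (pow_pos (by norm_num) m).ne'
      rw [hsplit, pvJoin_append _ _ _ hne hne, ih]
      simp [pvRep, List.append_assoc]

-- the loop of A, started in the self-doubling state pvRep v j, lands exactly where
-- pvFindM's arithmetic says it does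
theorem pvMain : ∀ (n j : Nat) (v : List Char) (target : Int),
    50000002 ≤ 2 ^ (j + n) * (v.length + 1) →
    ((pvRep v j).length ≤ 50000000 ∨ target ≤ (pvBytes (pvRep v j) : Int)) →
    pvLoopA target (pvRep v j) (pvRep v j)
      = pvRep v (pvFindM target (pvBytes v) v.length j) := by
  intro n
  induction n with
  | zero =>
      intro j v target hbig hH
      have hlen := pvRep_length v j
      have hbytes := pvRep_bytes v j
      simp only [Nat.add_zero] at hbig
      have hlarge : 50000000 < (pvRep v j).length := by omega
      have htgt : target ≤ (pvBytes (pvRep v j) : Int) := by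
        rcases hH with h | h
        · omega
        · exact h
      rw [pvLoopA, pvFindM]
      have hc1 : ¬ ((pvBytes (pvRep v j) : Int) < target) := by omega
      have hc2 : ¬ ((2 ^ j * (pvBytes v + 1) : Int) - 1 < target ∧
          (2 ^ j * (v.length + 1) : Int) - 1 ≤ 50000000) := by
        intro ⟨h1, _⟩
        have : ((pvBytes (pvRep v j) : Int) + 1) = (2 ^ j * (pvBytes v + 1) : Int) := by
          exact_mod_cast hbytes
        omega
      rw [if_neg hc1, if_neg hc2]
  | succ n ih =>
      intro j v target hbig hH
      have hbytes := pvRep_bytes v j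
      have hbytesInt : ((pvBytes (pvRep v j) : Int) + 1) = (2 ^ j * (pvBytes v + 1) : Int) := by
        exact_mod_cast hbytes
      by_cases hb : (pvBytes (pvRep v j) : Int) < target
      · -- loop body runs
        have hlenJ : (pvRep v j).length ≤ 50000000 := by
          rcases hH with h | h
          · exact h
          · omega
        have hstep : pvRep v j ++ '\n' :: pvRep v j = pvRep v (j + 1) := rfl
        have hlen1 := pvRep_length v (j + 1)
        have hbytes1 := pvRep_bytes v (j + 1)
        have hbytes1Int : ((pvBytes (pvRep v (j + 1)) : Int) + 1)
            = (2 ^ (j + 1) * (pvBytes v + 1) : Int) := by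
          exact_mod_cast hbytes1
        have hguardJ : (2 ^ j * (pvBytes v + 1) : Int) - 1 < target ∧
            (2 ^ j * (v.length + 1) : Int) - 1 ≤ 50000000 := by
          constructor
          · omega
          · have := pvRep_length v j
            have : ((pvRep v j).length : Int) + 1 = (2 ^ j * (v.length + 1) : Int) := by
              exact_mod_cast this
            omega
        rw [pvLoopA, if_pos hb]
        simp only [hstep]
        rw [pvFindM, if_pos hguardJ]
        by_cases hl : (pvRep v (j + 1)).length > 50000000
        · rw [if_pos hl]
          rw [pvFindM]
          have hc2 : ¬ ((2 ^ (j + 1) * (pvBytes v + 1) : Int) - 1 < target ∧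
              (2 ^ (j + 1) * (v.length + 1) : Int) - 1 ≤ 50000000) := by
            intro ⟨_, h2⟩
            have : ((pvRep v (j + 1)).length : Int) + 1
                = (2 ^ (j + 1) * (v.length + 1) : Int) := by
              exact_mod_cast hlen1
            omega
          rw [if_neg hc2]
        · rw [if_neg hl]
          have hbig' : 50000002 ≤ 2 ^ ((j + 1) + n) * (v.length + 1) := by
            have : (j + 1) + n = j + (n + 1) := by omega
            rw [this]; exact hbig
          exact ih (j + 1) v target hbig' (Or.inl (by omega))
      · -- loop exits immediately
        rw [pvLoopA, if_neg hb, pvFindM]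
        have hc2 : ¬ ((2 ^ j * (pvBytes v + 1) : Int) - 1 < target ∧
            (2 ^ j * (v.length + 1) : Int) - 1 ≤ 50000000) := by
          intro ⟨h1, _⟩
          omega
        rw [if_neg hc2]

-- ===== VERDICT (by name: the statement is the Claim_ definition above) =====
theorem force_big_text_py_spec : Claim_equal_force_big_text_py := by
  intro text target hdom
  unfold Spec_force_big_text_py force_big_text_py force_big_text_py_alt
  by_cases h0 : target ≤ 0
  · rw [if_pos h0, if_pos h0]
  · rw [if_neg h0, if_neg h0]
    by_cases hnil : text.toList ≠ []
    · simp only [if_pos hnil]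
      by_cases hge : (pvBytes text.toList : Int) ≥ target
      · rw [if_pos hge, pvLoopA, if_neg (by omega)]
        exact String.ofList_toList
      · rw [if_neg hge]
        rw [pvLoopA, if_pos (by omega)]
        simp only []
        have hstep : text.toList ++ '\n' :: text.toList = pvRep text.toList 1 := rfl
        rw [hstep]
        have hlen1 := pvRep_length text.toList 1
        by_cases hl : (pvRep text.toList 1).length > 50000000
        · rw [if_pos hl]
          rw [pvFindM]
          have hc2 : ¬ ((2 ^ 1 * (pvBytes text.toList + 1) : Int) - 1 < target ∧
              (2 ^ 1 * (text.toList.length + 1) : Int) - 1 ≤ 50000000) := by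
            intro ⟨_, h2⟩
            have hcast : (((pvRep text.toList 1).length : Int) + 1)
                = (2 ^ 1 * (text.toList.length + 1) : Int) := by
              exact_mod_cast hlen1
            omega
          rw [if_neg hc2, pvJoin_replicate_pow]
        · rw [if_neg hl]
          have hbig : 50000002 ≤ 2 ^ (1 + 26) * (text.toList.length + 1) := by
            have h1 : (1 : Nat) ≤ text.toList.length + 1 := by omega
            calc 50000002 ≤ 2 ^ 27 * 1 := by norm_num
            _ ≤ 2 ^ 27 * (text.toList.length + 1) := Nat.mul_le_mul_left _ h1
          rw [pvMain 26 1 text.toList target hbig (Or.inl (by omega)),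
            pvJoin_replicate_pow]
    · have hnil' : text.toList = [] := not_not.mp hnil
      have hbz : pvBytes ([] : List Char) = 0 := rfl
      rw [hnil']
      rw [if_neg (show ¬(([] : List Char) ≠ []) from by simp)]
      rw [if_neg (show ¬((pvBytes ([] : List Char) : Int) ≥ target) from by rw [hbz]; omega)]
      rw [if_neg (show ¬(([] : List Char) ≠ []) from by simp)]
      show String.ofList (pvLoopA target [] ['x'])
          = String.ofList (PySem.Chars.join ['\n']
              (List.replicate (2 ^ (pvFindM target 2 2 0)) ['\n', 'x']))
      rw [pvLoopA, if_pos (show (pvBytes ([] : List Char) : Int) < target from by rw [hbz]; omega)]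
      simp only [List.nil_append]
      rw [if_neg (by decide)]
      rw [pvJoin_replicate_pow]
      have hbig : 50000002 ≤ 2 ^ (0 + 26) * (((['\n', 'x'] : List Char)).length + 1) := by
        norm_num
      exact congrArg String.ofList
        (pvMain 26 0 ['\n', 'x'] target hbig (Or.inl (by decide)))
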